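-- pv_equiv track=rewrite | github.com/Shirhussain/Algorithm_by_shir | graph/deepDive/can_fly.py | is_path_possible
-- ===== SOURCE A (Python) =====
-- from collections import defaultdict
-- from typing import List, Tuple, Dict
--
-- def is_path_possible(cities: List[str], flights: List[Tuple[str, str, int, int]],
--                      start_city: str, destination_city: str, start_time: int) -> bool:
--     visited = set()
--
--     # Each node is mapped into a tuple (dst, dep, dur)
--     neighbors = create_adjacency_list(flights)
--
--     def dfs(city, cur_time):
--         if city == destination_city:
--             return True
--
--         if city in visited:
--             return
--
--         visited.add(city)
--
--         for dst, dep, dur in neighbors[city]: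
--             if cur_time <= dep:
--                 if dfs(dst, dep+dur) == True:
--                     return True
--
--         return False
--
--     return dfs(start_city, start_time)
--
-- def create_adjacency_list(flights: List[Tuple[str, str, int, int]]) -> Dict[str, List[Tuple[str, int, int]]]:
--     neighbors = defaultdict(list)
--
--     for src, dst, dep, dur in flights:
--         neighbors[src].append((dst, dep, dur))
--
--     return neighbors
-- ===== SOURCE B (Python) =====
-- def is_path_possible(cities, flights, start_city, destination_city, start_time):
--     neighbors = {}
--     for src, dst, dep, dur in flights:
--         neighbors.setdefault(src, []).append((dst, dep, dur))
--
--     visited = set()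
--     stack = [(start_city, start_time)]
--     while stack:
--         city, cur_time = stack.pop()
--         if city == destination_city:
--             return True
--         if city in visited:
--             continue
--         visited.add(city)
--         # push in reverse list order so edges are explored left-to-right,
--         # reproducing the recursive preorder (visited is marked on pop)
--         for dst, dep, dur in reversed(neighbors.get(city, [])):
--             if cur_time <= dep:
--                 stack.append((dst, dep + dur))
--     return False
-- ===== Notes on version B (the rewrite author's own statement) =====
-- stated objective: alternative
-- what changed: Replaces the nested recursive dfs (shared mutable visited set) with an explicit-stack iterative DFS: destination checked on pop before the visited test, visited marked on pop, neighbours pushed in reverse order so edges are explored left-to-right as in the recursion.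
import Mathlib
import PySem

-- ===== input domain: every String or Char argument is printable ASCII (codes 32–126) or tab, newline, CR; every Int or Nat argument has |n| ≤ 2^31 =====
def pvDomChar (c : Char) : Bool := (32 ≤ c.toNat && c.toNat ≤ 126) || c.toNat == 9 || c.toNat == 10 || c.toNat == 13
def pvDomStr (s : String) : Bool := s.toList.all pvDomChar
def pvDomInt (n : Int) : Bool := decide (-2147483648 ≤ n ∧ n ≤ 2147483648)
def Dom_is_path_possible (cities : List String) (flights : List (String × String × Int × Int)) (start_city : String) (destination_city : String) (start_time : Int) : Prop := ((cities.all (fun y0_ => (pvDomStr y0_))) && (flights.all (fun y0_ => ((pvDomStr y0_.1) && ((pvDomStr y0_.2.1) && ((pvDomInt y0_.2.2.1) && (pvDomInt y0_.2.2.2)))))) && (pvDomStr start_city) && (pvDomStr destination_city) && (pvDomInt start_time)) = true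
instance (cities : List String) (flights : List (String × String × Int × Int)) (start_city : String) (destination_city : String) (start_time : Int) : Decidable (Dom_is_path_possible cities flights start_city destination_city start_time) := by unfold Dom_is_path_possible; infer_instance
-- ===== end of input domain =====

-- B replaces A's recursive DFS with an explicit-stack iterative DFS (visited marked on pop,
-- neighbours pushed in reverse order), same return value; objective: alternative decomposition.

-- ===== PORT A =====
-- defaultdict(list) with neighbors[src].append((dst, dep, dur)); dfs also reads neighbors[city],
-- which for a missing key yields [] (the defaultdict inserts an empty list; the dict is not
-- returned, so getD with default [] is exact).
def create_adjacency_list (flights : List (String × String × Int × Int)) :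
    PySem.Dict String (List (String × Int × Int)) :=
  flights.foldl (fun d p => d.modify p.1 [] (· ++ [p.2])) PySem.Dict.empty

-- Python's dfs returns True, None (already visited) or False; the result is only consumed by
-- '== True' and at top level (where the visited set is empty, so None is never returned there):
-- the None case is ported as false, which is exact for every consumer.
-- The recursion is ported with fuel; 2*|flights|+2 exceeds the recursion depth (each level
-- marks a previously unvisited city drawn from start_city and the flight destinations).
mutual
def dfsA (adj : PySem.Dict String (List (String × Int × Int))) (dest : String)
    (fuel : Nat) (visited : PySem.Set String) (city : String) (t : Int) :
    Bool × PySem.Set String :=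
  match fuel with
  | 0 => (false, visited)  -- unreachable with the fuel supplied below
  | g + 1 =>
    if city == dest then (true, visited)
    else if PySem.Set.contains visited city then (false, visited)
    else goA adj dest g (PySem.Set.add visited city) (adj.getD city []) t
termination_by (fuel, 0)

def goA (adj : PySem.Dict String (List (String × Int × Int))) (dest : String)
    (g : Nat) (visited : PySem.Set String) (entries : List (String × Int × Int)) (t : Int) :
    Bool × PySem.Set String :=
  match entries with
  | [] => (false, visited)
  | e :: es =>
    if t ≤ e.2.1 then
      match dfsA adj dest g visited e.1 (e.2.1 + e.2.2) with
      | (true, v') => (true, v')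
      | (false, v') => goA adj dest g v' es t
    else goA adj dest g visited es t
termination_by (g, entries.length + 1)
end

def is_path_possible (cities : List String) (flights : List (String × String × Int × Int)) (start_city : String) (destination_city : String) (start_time : Int) : Bool :=
  (dfsA (create_adjacency_list flights) destination_city (2 * flights.length + 2)
    PySem.Set.empty start_city start_time).1

-- ===== PORT B =====
-- number of keys of the dict not yet visited: the termination measure of B's while loop
def unvis (l : List String) (v : PySem.Set String) : Nat :=
  (l.dedup.filter (fun k => !(PySem.Set.contains v k))).length

-- cited by loopB's decreasing_by: visiting a key of the dict shrinks the measure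
lemma unvis_add_lt (l : List String) (v : PySem.Set String) (c : String)
    (hc : c ∈ l) (hv : c ∉ v) : unvis l (PySem.Set.add v c) < unvis l v := by
  unfold unvis
  have himp : ∀ x, (!(PySem.Set.contains (PySem.Set.add v c) x)) = true →
      (!(PySem.Set.contains v x)) = true := by
    intro x hx
    by_cases hxv : x ∈ v <;> simp [PySem.Set.mem_add, hxv] at hx ⊢
  have hC : (!(PySem.Set.contains v c)) = true := by simp [hv]
  have hCa : (!(PySem.Set.contains (PySem.Set.add v c) c)) = false := by
    simp [PySem.Set.mem_add]
  have key : ∀ (L : List String),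
      ((L.filter (fun k => !(PySem.Set.contains (PySem.Set.add v c) k))).length ≤
        (L.filter (fun k => !(PySem.Set.contains v k))).length) ∧
      (c ∈ L → (L.filter (fun k => !(PySem.Set.contains (PySem.Set.add v c) k))).length <
        (L.filter (fun k => !(PySem.Set.contains v k))).length) := by
    intro L
    induction L with
    | nil => simp
    | cons a L ih =>
      rcases ih with ⟨ih1, ih2⟩
      constructor
      · by_cases hA : (!(PySem.Set.contains (PySem.Set.add v c) a)) = true
        · simp only [List.filter_cons, hA, himp a hA, if_true, List.length_cons]; omega
        · have hA' : (!(PySem.Set.contains (PySem.Set.add v c) a)) = false := by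
            simpa using hA
          by_cases hB : (!(PySem.Set.contains v a)) = true <;>
            simp only [List.filter_cons, hA', hB, Bool.false_eq_true, if_true, if_false,
              List.length_cons] <;> omega
      · intro hcmem
        rcases List.mem_cons.1 hcmem with rfl | hcl
        · simp only [List.filter_cons, hCa, hC, Bool.false_eq_true, if_true, if_false,
            List.length_cons]
          omega
        · by_cases hA : (!(PySem.Set.contains (PySem.Set.add v c) a)) = true
          · simp only [List.filter_cons, hA, himp a hA, if_true, List.length_cons]
            have := ih2 hcl; omega
          · have hA' : (!(PySem.Set.contains (PySem.Set.add v c) a)) = false := by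
              simpa using hA
            by_cases hB : (!(PySem.Set.contains v a)) = true <;>
              simp only [List.filter_cons, hA', hB, Bool.false_eq_true, if_true, if_false,
                List.length_cons] <;> (have := ih2 hcl; omega)
  exact (key l.dedup).2 (List.mem_dedup.2 hc)

-- cited by loopB's decreasing_by: visiting a non-key leaves the measure unchanged
lemma unvis_add_eq_of_not_mem (l : List String) (v : PySem.Set String) (c : String)
    (hc : c ∉ l) : unvis l (PySem.Set.add v c) = unvis l v := by
  unfold unvis
  congr 1
  apply List.filter_congr
  intro x hx
  have hxc : x ≠ c := fun h => hc (h ▸ List.mem_dedup.1 hx)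
  by_cases hxv : x ∈ v <;> simp [PySem.Set.mem_add, hxv, hxc]

-- B's while loop over the explicit stack (head of the list = top of the stack; the Python
-- 'for … in reversed(…): stack.append(…)' is the foldl over the reversed neighbour list).
def loopB (adj : PySem.Dict String (List (String × Int × Int))) (dest : String)
    (stack : List (String × Int)) (visited : PySem.Set String) : Bool :=
  match stack with
  | [] => false
  | (c, t) :: rest =>
    if c == dest then true
    else if PySem.Set.contains visited c then loopB adj dest rest visited
    else loopB adj dest
      ((adj.getD c []).reverse.foldl
        (fun st e => if t ≤ e.2.1 then (e.1, e.2.1 + e.2.2) :: st else st) rest)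
      (PySem.Set.add visited c)
termination_by (unvis adj.keys visited, stack.length)
decreasing_by
  · exact Prod.Lex.right _ (by simp)
  · rename_i hdest hvis
    by_cases hk : c ∈ adj.keys
    · exact Prod.Lex.left _ _ (unvis_add_lt _ _ _ hk
        (fun h => hvis ((PySem.Set.contains_iff _ _).2 h)))
    · have hcon : adj.contains c = false := by
        by_contra h
        exact hk ((PySem.Dict.contains_iff_mem_keys _ _).1 (by simpa using h))
      rw [PySem.Dict.getD_of_not_contains _ _ hcon]
      rw [unvis_add_eq_of_not_mem _ _ _ hk]
      exact Prod.Lex.right _ (by simp)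

def is_path_possible_alt (cities : List String) (flights : List (String × String × Int × Int)) (start_city : String) (destination_city : String) (start_time : Int) : Bool :=
  loopB (create_adjacency_list flights) destination_city
    [(start_city, start_time)] PySem.Set.empty

-- ===== PRECONDITION & SPEC =====
def Spec_is_path_possible (cities : List String) (flights : List (String × String × Int × Int)) (start_city : String) (destination_city : String) (start_time : Int) (out : Bool) : Prop := out = is_path_possible_alt cities flights start_city destination_city start_time
instance (cities : List String) (flights : List (String × String × Int × Int)) (start_city : String) (destination_city : String) (start_time : Int) (out : Bool) : Decidable (Spec_is_path_possible cities flights start_city destination_city start_time out) := by unfold Spec_is_path_possible; infer_instance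

-- ===== CLAIM (what is proved, stated in full; the proofs are below) =====
def Claim_equal_is_path_possible : Prop := ∀ (cities : List String) (flights : List (String × String × Int × Int)) (start_city : String) (destination_city : String) (start_time : Int), Dom_is_path_possible cities flights start_city destination_city start_time → Spec_is_path_possible cities flights start_city destination_city start_time (is_path_possible cities flights start_city destination_city start_time)

-- ===== LEMMAS AND PROOFS =====

lemma not_contains_of_not_mem (v : PySem.Set String) (x : String) (h : x ∉ v) :
    PySem.Set.contains v x = false := by
  cases hc : PySem.Set.contains v x
  · rfl
  · exact absurd ((PySem.Set.contains_iff _ _).1 hc) h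

lemma len_filter_mono {α : Type} (l : List α) (p q : α → Bool)
    (h : ∀ x ∈ l, p x = true → q x = true) :
    (l.filter p).length ≤ (l.filter q).length := by
  induction l with
  | nil => simp
  | cons a l ih =>
    have ih' := ih (fun x hx => h x (List.mem_cons_of_mem _ hx))
    by_cases hp : p a = true
    · rw [List.filter_cons_of_pos hp, List.filter_cons_of_pos (h a (List.mem_cons_self) hp)]
      simpa using ih'
    · rw [List.filter_cons_of_neg (by simpa using hp)]
      by_cases hq : q a = true
      · rw [List.filter_cons_of_pos hq]; simp; omega
      · rw [List.filter_cons_of_neg (by simpa using hq)]; exact ih'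

lemma unvis_mono (l : List String) (v w : PySem.Set String)
    (h : ∀ x, x ∈ v → x ∈ w) : unvis l w ≤ unvis l v := by
  unfold unvis
  apply len_filter_mono
  intro x _
  simp only [Bool.not_eq_true']
  intro hw
  apply not_contains_of_not_mem
  intro hv
  rw [(PySem.Set.contains_iff _ _).2 (h x hv)] at hw
  cases hw

lemma adj_getD (flights : List (String × String × Int × Int)) (c : String) :
    (create_adjacency_list flights).getD c [] =
      (flights.filter (fun p => p.1 == c)).map (·.2) := by
  unfold create_adjacency_list
  simpa using PySem.Dict.getD_foldl_modify_append flights PySem.Dict.empty c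

lemma grow_go (adj : PySem.Dict String (List (String × Int × Int))) (dest : String) (g : Nat)
    (IH : ∀ v c t x, x ∈ v → x ∈ (dfsA adj dest g v c t).2) :
    ∀ es v t x, x ∈ v → x ∈ (goA adj dest g v es t).2 := by
  intro es
  induction es with
  | nil => intro v t x hx; simpa [goA] using hx
  | cons e es ih =>
    intro v t x hx
    rw [goA]
    by_cases ht : t ≤ e.2.1
    · simp only [if_pos ht]
      have hx' := IH v e.1 (e.2.1 + e.2.2) x hx
      rcases hr : dfsA adj dest g v e.1 (e.2.1 + e.2.2) with ⟨b, v'⟩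
      rw [hr] at hx'
      cases b
      · simpa using ih v' t x hx'
      · simpa using hx'
    · simp only [if_neg ht]
      exact ih v t x hx

lemma grow_dfs (adj : PySem.Dict String (List (String × Int × Int))) (dest : String) :
    ∀ fuel v c t x, x ∈ v → x ∈ (dfsA adj dest fuel v c t).2 := by
  intro fuel
  induction fuel with
  | zero => intro v c t x hx; simpa [dfsA] using hx
  | succ g ih =>
    intro v c t x hx
    rw [dfsA]
    by_cases hd : c = dest
    · simpa [hd] using hx
    · by_cases hv : c ∈ v
      · simpa [hd, hv] using hx
      · simp only [beq_iff_eq, hd, if_false, PySem.Set.contains_eq_listContains,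
          List.contains_iff_mem, decide_eq_true_eq, hv, if_false]
        exact grow_go adj dest g ih _ _ t x ((PySem.Set.mem_add _ _ _).2 (Or.inl hx))

lemma foldpush (L : List (String × Int × Int)) (rest : List (String × Int)) (t : Int) :
    L.reverse.foldl (fun st e => if t ≤ e.2.1 then (e.1, e.2.1 + e.2.2) :: st else st) rest
      = (L.filter (fun e => decide (t ≤ e.2.1))).map (fun e => (e.1, e.2.1 + e.2.2)) ++ rest := by
  rw [List.foldl_reverse]
  induction L with
  | nil => simp
  | cons e es ih =>
    by_cases ht : t ≤ e.2.1
    · simp [List.filter_cons, ht, ih]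
    · simp [List.filter_cons, ht, ih]

lemma sim (flights : List (String × String × Int × Int)) (dest : String) (U : List String)
    (hU : ∀ f ∈ flights, f.2.1 ∈ U) :
    ∀ n (v : PySem.Set String) (c : String) (t : Int) (rest : List (String × Int)) (fA : Nat),
      unvis U v ≤ n → unvis U v < fA → c ∈ U →
      loopB (create_adjacency_list flights) dest ((c, t) :: rest) v =
        (if (dfsA (create_adjacency_list flights) dest fA v c t).1 then true
         else loopB (create_adjacency_list flights) dest rest
           (dfsA (create_adjacency_list flights) dest fA v c t).2) := by
  intro n
  induction n using Nat.strong_induction_on with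
  | _ n IH =>
  intro v c t rest fA hn hfA hcU
  obtain ⟨g, rfl⟩ : ∃ g, fA = g + 1 := ⟨fA - 1, by omega⟩
  by_cases hcd : c = dest
  · rw [loopB]; simp [dfsA, hcd]
  · by_cases hcv : c ∈ v
    · have hc : PySem.Set.contains v c = true := (PySem.Set.contains_iff _ _).2 hcv
      rw [loopB]; simp [dfsA, hcd, hcv, hc]
    · have hcvF : PySem.Set.contains v c = false := not_contains_of_not_mem _ _ hcv
      have hlt : unvis U (PySem.Set.add v c) < unvis U v := unvis_add_lt _ _ _ hcU hcv
      have hDdef : dfsA (create_adjacency_list flights) dest (g + 1) v c t =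
          goA (create_adjacency_list flights) dest g (PySem.Set.add v c)
            ((create_adjacency_list flights).getD c []) t := by
        rw [dfsA]; simp [hcd, hcv]
      have hEnt : ∀ e ∈ (create_adjacency_list flights).getD c [],
          (e : String × Int × Int).1 ∈ U := by
        rw [adj_getD]
        intro e he
        rcases List.mem_map.1 he with ⟨f, hf, rfl⟩
        exact hU f (List.mem_filter.1 hf).1
      have sub : ∀ es (v' : PySem.Set String), (∀ e ∈ es, (e : String × Int × Int).1 ∈ U) →
          (∀ x, x ∈ PySem.Set.add v c → x ∈ v') →
          loopB (create_adjacency_list flights) dest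
              (((es.filter (fun e => decide (t ≤ e.2.1))).map
                (fun e => (e.1, e.2.1 + e.2.2))) ++ rest) v'
            = (if (goA (create_adjacency_list flights) dest g v' es t).1 then true
               else loopB (create_adjacency_list flights) dest rest
                 (goA (create_adjacency_list flights) dest g v' es t).2) := by
        intro es
        induction es with
        | nil => intro v' _ _; simp [goA]
        | cons e es ihes =>
          intro v' hes hsub
          have hm : unvis U v' ≤ unvis U (PySem.Set.add v c) := unvis_mono _ _ _ hsub
          by_cases ht : t ≤ e.2.1
          · have hfc : List.filter (fun e => decide (t ≤ e.2.1)) (e :: es)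
                = e :: List.filter (fun e => decide (t ≤ e.2.1)) es := by
              simp [List.filter_cons, ht]
            rw [goA, if_pos ht]
            rcases hr : dfsA (create_adjacency_list flights) dest g v' e.1 (e.2.1 + e.2.2)
              with ⟨b, v''⟩
            rw [hfc, List.map_cons, List.cons_append,
              IH (unvis U v') (by omega) v' e.1 (e.2.1 + e.2.2) _ g le_rfl (by omega)
                (hes e List.mem_cons_self), hr]
            cases b
            · simp only [Bool.false_eq_true, if_false]
              exact ihes v'' (fun e' he' => hes e' (List.mem_cons_of_mem _ he'))
                (fun x hx => by
                  have hgx := grow_dfs (create_adjacency_list flights) dest g v' e.1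
                    (e.2.1 + e.2.2) x (hsub x hx)
                  rwa [hr] at hgx)
            · simp
          · have hfc : List.filter (fun e => decide (t ≤ e.2.1)) (e :: es)
                = List.filter (fun e => decide (t ≤ e.2.1)) es := by
              simp [List.filter_cons, ht]
            rw [goA, if_neg ht, hfc]
            exact ihes v' (fun e' he' => hes e' (List.mem_cons_of_mem _ he')) hsub
      rw [loopB, if_neg (show ¬ (c == dest) = true by simp [hcd]),
        if_neg (show ¬ PySem.Set.contains v c = true by simpa using hcv),
        foldpush, hDdef]
      exact sub ((create_adjacency_list flights).getD c []) (PySem.Set.add v c) hEnt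
        (fun x hx => hx)

theorem is_path_possible_spec : Claim_equal_is_path_possible := by
  unfold Claim_equal_is_path_possible
  intro cities flights start_city destination_city start_time _
  unfold Spec_is_path_possible is_path_possible is_path_possible_alt
  have hU : ∀ f ∈ flights, (f : String × String × Int × Int).2.1 ∈
      (start_city :: flights.map (fun f => f.2.1)) :=
    fun f hf => List.mem_cons_of_mem _ (List.mem_map_of_mem hf)
  have hlen : unvis (start_city :: flights.map (fun f => f.2.1)) PySem.Set.empty <
      2 * flights.length + 2 := by
    have h1 : unvis (start_city :: flights.map (fun f => f.2.1)) PySem.Set.empty ≤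
        (start_city :: flights.map (fun f => f.2.1)).dedup.length := List.length_filter_le _ _
    have h2 := (List.dedup_sublist (start_city :: flights.map (fun f => f.2.1))).length_le
    simp only [List.length_cons, List.length_map] at h2
    omega
  have hsim := sim flights destination_city (start_city :: flights.map (fun f => f.2.1)) hU
    (unvis (start_city :: flights.map (fun f => f.2.1)) PySem.Set.empty)
    PySem.Set.empty start_city start_time [] (2 * flights.length + 2) le_rfl hlen
    List.mem_cons_self
  rw [hsim]
  rcases hr : dfsA (create_adjacency_list flights) destination_city (2 * flights.length + 2)
    PySem.Set.empty start_city start_time with ⟨b, v'⟩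
  cases b <;> simp [loopB]
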